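-- pv_equiv track=rewrite | github.com/samuelkax/sektionsforteckning | app.py | shorten_address_list
-- ===== SOURCE A (Python) =====
-- def shorten_address_list(addresses):
--     ranges = []
--     start = end = addresses[0]
--
--     for address in addresses[1:]:
--         if int(address.split('.')[1]) == int(end.split('.')[1]) + 1:
--             end = address
--         else:
--             if start == end:
--                 ranges.append(start)
--             else:
--                 ranges.append(f"{start}-{end}")
--             start = end = address
--
--     if start == end:
--         ranges.append(start)
--     else:
--         ranges.append(f"{start}-{end}")
--
--     return ranges
-- ===== SOURCE B (Python) =====
-- def shorten_address_list(addresses):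
--     # index-based: compute break positions first, then emit one string per (i, j) bound pair
--     n = len(addresses)
--     breaks = [i for i in range(1, n)
--               if int(addresses[i].split('.')[1]) != int(addresses[i - 1].split('.')[1]) + 1]
--     bounds = [0] + breaks + [n]
--     return [addresses[i] if j - i == 1 else f"{addresses[i]}-{addresses[j - 1]}"
--             for i, j in zip(bounds, bounds[1:])]
-- ===== Notes on version B (the rewrite author's own statement) =====
-- stated objective: alternative
-- what changed: Replaces A's stateful flush-on-break accumulator (tracking start/end strings and formatting at each break and again at the end) by an index-based staged computation: first a list of break positions, then bounds = [0]+breaks+[n], then one output string per adjacent bound pair, deciding single-vs-range by j-i==1 instead of start==end.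
import Mathlib
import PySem

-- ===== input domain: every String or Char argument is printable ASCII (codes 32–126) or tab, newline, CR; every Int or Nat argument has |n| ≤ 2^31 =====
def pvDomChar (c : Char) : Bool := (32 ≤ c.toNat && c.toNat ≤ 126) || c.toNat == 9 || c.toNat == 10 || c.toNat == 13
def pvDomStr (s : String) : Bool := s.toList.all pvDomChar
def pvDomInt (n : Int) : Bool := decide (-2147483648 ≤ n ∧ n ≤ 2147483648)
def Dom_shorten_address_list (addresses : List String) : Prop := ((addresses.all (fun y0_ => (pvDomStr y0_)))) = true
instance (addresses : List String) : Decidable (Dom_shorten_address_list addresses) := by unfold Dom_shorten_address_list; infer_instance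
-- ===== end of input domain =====

-- B replaces A's flush-on-break accumulator by an index-based staged computation (break positions, then bound pairs); same cost, different decomposition.

-- int(s.split('.')[1]) — shared octet extraction; Pre_ guarantees both lookups succeed, defaults never matter inside Pre_
def pvOct (s : String) : Int :=
  (PySem.Int.ofStr? (((PySem.Str.split? s ".").getD []).getD 1 "")).getD 0

-- ===== PORT A =====
def shorten_address_list (addresses : List String) : List String :=
  let start0 := addresses.headD ""   -- addresses[0]; Pre_ excludes the empty list (IndexError)
  let st := (addresses.drop 1).foldl
    (fun (s : List String × String × String) address =>
      let ranges := s.1; let start := s.2.1; let end_ := s.2.2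
      if pvOct address == pvOct end_ + 1 then
        (ranges, start, address)
      else
        (ranges ++ [if start == end_ then start else start ++ "-" ++ end_], address, address))
    ([], start0, start0)
  st.1 ++ [if st.2.1 == st.2.2 then st.2.1 else st.2.1 ++ "-" ++ st.2.2]

-- ===== PORT B =====
-- indices in Source B are Python ints but provably nonnegative (range(1,n) and bound pairs), so Nat indexing with getD is exact inside Pre_
def shorten_address_list_alt (addresses : List String) : List String :=
  let n := addresses.length
  let breaks := (List.range' 1 (n - 1)).filter
    (fun i => !(pvOct (addresses.getD i "") == pvOct (addresses.getD (i - 1) "") + 1))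
  let bounds := 0 :: (breaks ++ [n])
  (bounds.zip (breaks ++ [n])).map (fun p =>
    if p.2 - p.1 == 1 then addresses.getD p.1 ""
    else addresses.getD p.1 "" ++ "-" ++ addresses.getD (p.2 - 1) "")

-- ===== PRECONDITION & SPEC =====
-- pvOctOk a: a.split('.') has a second piece and int() accepts it — where Python's int(address.split('.')[1]) returns
def pvOctOk (a : String) : Bool :=
  match ((PySem.Str.split? a ".").getD [])[1]? with
  | some s => (PySem.Int.ofStr? s).isSome
  | none => false

-- A raises IndexError when the list is empty, and parses the second octet of every element once the list has ≥ 2 elements (ValueError/IndexError otherwise)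
def Pre_shorten_address_list (addresses : List String) : Prop :=
  addresses ≠ [] ∧ (2 ≤ addresses.length → ∀ a ∈ addresses, pvOctOk a = true)
instance (addresses : List String) : Decidable (Pre_shorten_address_list addresses) := by
  unfold Pre_shorten_address_list; infer_instance

def pvWitness_shorten_address_list : List String := ["10.1.0", "10.2.0", "10.5.0"]

def Spec_shorten_address_list (addresses : List String) (out : List String) : Prop := out = shorten_address_list_alt addresses
instance (addresses : List String) (out : List String) : Decidable (Spec_shorten_address_list addresses out) := by unfold Spec_shorten_address_list; infer_instance

-- ===== CLAIM (what is proved, stated in full; the proofs are below) =====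
def Claim_equal_shorten_address_list : Prop := ∀ (addresses : List String), Dom_shorten_address_list addresses → Pre_shorten_address_list addresses → Spec_shorten_address_list addresses (shorten_address_list addresses)

-- ===== LEMMAS AND PROOFS =====

-- proof-side names for the two ports' building blocks (definitionally equal to the lambdas in the ports;
-- List.getD l i d is definitionally l[i]?.getD d, used in that form here so simp normal forms match)
def pvStepA (s : List String × String × String) (address : String) : List String × String × String :=
  if pvOct address == pvOct s.2.2 + 1 then (s.1, s.2.1, address)
  else (s.1 ++ [if s.2.1 == s.2.2 then s.2.1 else s.2.1 ++ "-" ++ s.2.2], address, address)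

def pvFmt (s e : String) : String := if s == e then s else s ++ "-" ++ e

def pvBrk (as : List String) (i : Nat) : Bool :=
  !(pvOct (as[i]?.getD "") == pvOct (as[i - 1]?.getD "") + 1)

def pvSeg (as : List String) (p : Nat × Nat) : String :=
  if p.2 - p.1 == 1 then as[p.1]?.getD "" else as[p.1]?.getD "" ++ "-" ++ as[p.2 - 1]?.getD ""

-- common reference: recursive chunking of the tail, carrying the current run's (start, end) strings
def pvGo (start end_ : String) : List String → List String
  | [] => [pvFmt start end_]
  | a :: t => if pvOct a = pvOct end_ + 1 then pvGo start a t
              else pvFmt start end_ :: pvGo a a t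

-- A's foldl equals the recursive chunking
theorem pvA_go (t : List String) : ∀ ranges start end_,
    (t.foldl pvStepA (ranges, start, end_)).1 ++
      [pvFmt (t.foldl pvStepA (ranges, start, end_)).2.1 (t.foldl pvStepA (ranges, start, end_)).2.2]
    = ranges ++ pvGo start end_ t := by
  induction t with
  | nil => intro ranges start end_; simp [pvGo]
  | cons a t ih =>
    intro ranges start end_
    rw [List.foldl_cons]
    by_cases h : pvOct a = pvOct end_ + 1
    · rw [show pvStepA (ranges, start, end_) a = (ranges, start, a) from by simp [pvStepA, h]]
      rw [ih]
      simp [pvGo, h]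
    · rw [show pvStepA (ranges, start, end_) a = (ranges ++ [pvFmt start end_], a, a) from by
        simp [pvStepA, pvFmt, h]]
      rw [ih]
      simp [pvGo, h]

-- octet chain: within a run, octets increase by exactly one per step
def pvChain (g : Nat → String) (s k : Nat) : Prop :=
  ∀ j, s < j → j ≤ k → pvOct (g j) = pvOct (g (j - 1)) + 1

theorem pvChain_oct (g : Nat → String) : ∀ d s, pvChain g s (s + d) →
    pvOct (g (s + d)) = pvOct (g s) + d := by
  intro d
  induction d with
  | zero => intro s _; simp
  | succ d ih =>
    intro s h
    have h1 : pvOct (g (s + d + 1)) = pvOct (g (s + d)) + 1 := by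
      have := h (s + d + 1) (by omega) (by omega)
      simpa using this
    have h2 := ih s (fun j hj hj' => h j hj (by omega))
    have h3 : pvOct (g (s + (d + 1))) = pvOct (g s) + d + 1 := by
      rw [show s + (d + 1) = s + d + 1 from by omega, h1, h2]
    rw [h3]
    push_cast
    ring

-- B's pair formatter agrees with A's string formatter across one run
theorem pvFmt2_eq (as : List String) (s k : Nat) (hsk : s ≤ k)
    (hc : pvChain (fun i => as[i]?.getD "") s k) :
    pvSeg as (s, k + 1) = pvFmt (as[s]?.getD "") (as[k]?.getD "") := by
  rcases Nat.eq_or_lt_of_le hsk with heq | hlt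
  · subst heq
    have h1 : s + 1 - s = 1 := by omega
    simp [pvSeg, pvFmt, h1]
  · have hne : as[s]?.getD "" ≠ as[k]?.getD "" := by
      intro hcontra
      obtain ⟨d, hd⟩ : ∃ d, k = s + d := ⟨k - s, by omega⟩
      subst hd
      have := pvChain_oct (fun i => as[i]?.getD "") d s hc
      simp only at this
      rw [← hcontra] at this
      omega
    have h1 : ((k + 1) - s == 1) = false := by
      simp only [beq_eq_false_iff_ne, ne_eq]
      omega
    have h2 : (as[s]?.getD "" == as[k]?.getD "") = false := by
      rw [beq_eq_false_iff_ne]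
      exact hne
    simp only [pvSeg, pvFmt, h1, Bool.false_eq_true, if_false, h2]
    rw [show k + 1 - 1 = k from rfl]

-- main correspondence: B's bound-pair map over the remaining suffix equals pvGo
theorem pvB_go (t : List String) : ∀ (as : List String) (s k : Nat),
    as.drop (k + 1) = t → s ≤ k → k < as.length →
    pvChain (fun i => as[i]?.getD "") s k →
    (((s :: (((List.range' (k + 1) (as.length - (k + 1))).filter (pvBrk as)) ++ [as.length])).zip
      (((List.range' (k + 1) (as.length - (k + 1))).filter (pvBrk as)) ++ [as.length])).map (pvSeg as))
    = pvGo (as[s]?.getD "") (as[k]?.getD "") t := by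
  induction t with
  | nil =>
    intro as s k hdrop hsk hk hc
    have hlen : as.length = k + 1 := by
      have h := congrArg List.length hdrop
      simp at h
      omega
    rw [hlen]
    simp only [Nat.sub_self, List.range'_zero, List.filter_nil, List.nil_append,
      List.zip_cons_cons, List.zip_nil_right, List.map_cons, List.map_nil, pvGo]
    rw [pvFmt2_eq as s k hsk hc]
  | cons a t ih =>
    intro as s k hdrop hsk hk hc
    have hlent : as.length - (k + 1) = t.length + 1 := by
      have h := congrArg List.length hdrop
      simp at h
      omega
    have hk1 : k + 1 < as.length := by omega
    have ha : as[k + 1]?.getD "" = a := by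
      have h0 : as[k + 1 + 0]? = some a := by
        rw [← List.getElem?_drop, hdrop]
        rfl
      simp only [Nat.add_zero] at h0
      rw [h0]
      rfl
    have hdrop' : as.drop (k + 2) = t := by
      have h := congrArg (List.drop 1) hdrop
      rw [List.drop_drop] at h
      simpa using h
    have hrange : List.range' (k + 1) (as.length - (k + 1)) =
        (k + 1) :: List.range' (k + 2) (as.length - (k + 2)) := by
      rw [show as.length - (k + 1) = (as.length - (k + 2)) + 1 from by omega]
      rw [List.range'_succ]
    rw [hrange]
    by_cases hcond : pvOct a = pvOct (as[k]?.getD "") + 1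
    · have hb : pvBrk as (k + 1) = false := by
        unfold pvBrk
        rw [show k + 1 - 1 = k from rfl, ha]
        simp [hcond]
      simp only [List.filter_cons, hb, Bool.false_eq_true, if_false]
      have hchain : pvChain (fun i => as[i]?.getD "") s (k + 1) := by
        intro j hj hj'
        rcases Nat.lt_or_ge j (k + 1) with hlt | hge
        · exact hc j hj (by omega)
        · have hj2 : j = k + 1 := by omega
          subst hj2
          show pvOct (as[k + 1]?.getD "") = pvOct (as[k + 1 - 1]?.getD "") + 1
          rw [show k + 1 - 1 = k from rfl, ha]
          exact hcond
      have hih := ih as s (k + 1) hdrop' (by omega) hk1 hchain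
      rw [hih, ha]
      simp [pvGo, hcond]
    · have hb : pvBrk as (k + 1) = true := by
        unfold pvBrk
        rw [show k + 1 - 1 = k from rfl, ha]
        simp [hcond]
      simp only [List.filter_cons, hb, if_true]
      simp only [List.cons_append, List.zip_cons_cons, List.map_cons]
      have hih := ih as (k + 1) (k + 1) hdrop' (le_refl _) hk1
        (fun j hj hj' => absurd (hj.trans_le hj') (lt_irrefl _))
      rw [hih, ha, pvFmt2_eq as s k hsk hc]
      simp [pvGo, hcond]

-- ===== VERDICT (by name: the statement is the Claim_ definition above) =====
theorem shorten_address_list_spec : Claim_equal_shorten_address_list := by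
  intro addresses _ hpre
  unfold Spec_shorten_address_list
  obtain ⟨hne, -⟩ := hpre
  cases addresses with
  | nil => exact absurd rfl hne
  | cons a t =>
    have hA : shorten_address_list (a :: t) = [] ++ pvGo a a t := pvA_go t [] a a
    have hB := pvB_go t (a :: t) 0 0 rfl (le_refl 0)
      (by simp) (fun j hj hj' => absurd (hj.trans_le hj') (lt_irrefl 0))
    calc shorten_address_list (a :: t) = [] ++ pvGo a a t := hA
      _ = pvGo a a t := by simp
      _ = shorten_address_list_alt (a :: t) := hB.symm
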